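-- pv_equiv track=rewrite | github.com/Mgs25/Edabit_Challenges | sort_word_by_string.py | sort_by_string
-- ===== SOURCE A (Python) =====
-- def sort_by_string(lst, txt):
--     lst,txt = list(lst),list(txt)
--     out = []
--     for letter in txt:
--         for word in lst:
--             if word.startswith(letter):
--                 out.append(word)
--
--     return out
-- ===== SOURCE B (Python) =====
-- def sort_by_string(lst, txt):
--     buckets = {}
--     for word in lst:
--         if word:
--             buckets.setdefault(word[0], []).append(word)
--     out = []
--     for ch in txt:
--         out.extend(buckets.get(ch, []))
--     return out
-- ===== Notes on version B (the rewrite author's own statement) =====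
-- stated objective: faster
-- what changed: Replaces the nested scan (whole word list rescanned for every character of txt) by a one-pass bucketing of words by first letter into a dict, then a single pass over txt concatenating buckets.
import Mathlib
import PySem

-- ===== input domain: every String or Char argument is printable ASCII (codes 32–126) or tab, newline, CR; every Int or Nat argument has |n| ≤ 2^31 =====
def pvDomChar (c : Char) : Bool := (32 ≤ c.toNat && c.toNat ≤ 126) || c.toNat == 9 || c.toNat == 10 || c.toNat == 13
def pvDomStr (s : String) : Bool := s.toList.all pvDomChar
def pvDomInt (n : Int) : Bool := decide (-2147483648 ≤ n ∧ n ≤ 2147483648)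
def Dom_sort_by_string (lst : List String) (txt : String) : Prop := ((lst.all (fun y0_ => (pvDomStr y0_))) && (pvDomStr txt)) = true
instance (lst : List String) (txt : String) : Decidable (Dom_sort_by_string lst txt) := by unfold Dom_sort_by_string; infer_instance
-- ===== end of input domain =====

-- B buckets words by first letter in one pass over lst, then walks txt once (asymptotically
-- faster than A's rescan of lst for every character of txt); return values proved equal.

-- ===== PORT A =====
def sort_by_string (lst : List String) (txt : String) : List String :=
  txt.toList.foldl (fun out letter =>
    lst.foldl (fun out word =>
      if PySem.Str.startswith word (String.ofList [letter]) then out ++ [word] else out) out) []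

-- ===== PORT B =====
def sort_by_string_alt (lst : List String) (txt : String) : List String :=
  let buckets : PySem.Dict Char (List String) :=
    lst.foldl (fun d word =>
      match word.toList with
      | [] => d
      | c :: _ => d.modify c [] (fun ws => ws ++ [word])) PySem.Dict.empty
  txt.toList.foldl (fun out ch => out ++ buckets.getD ch []) []

-- ===== PRECONDITION & SPEC =====
def Spec_sort_by_string (lst : List String) (txt : String) (out : List String) : Prop := out = sort_by_string_alt lst txt
instance (lst : List String) (txt : String) (out : List String) : Decidable (Spec_sort_by_string lst txt out) := by unfold Spec_sort_by_string; infer_instance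

-- ===== CLAIM (what is proved, stated in full; the proofs are below) =====
def Claim_equal_sort_by_string : Prop := ∀ (lst : List String) (txt : String), Dom_sort_by_string lst txt → Spec_sort_by_string lst txt (sort_by_string lst txt)

-- ===== LEMMAS AND PROOFS =====

-- "word begins with letter c": the common predicate both sides reduce to
def pvHead (c : Char) (w : String) : Bool :=
  match w.toList with
  | [] => false
  | a :: _ => a == c

theorem pvStartswith_single (w : String) (c : Char) :
    PySem.Str.startswith w (String.ofList [c]) = pvHead c w := by
  rw [PySem.Str.startswith_eq]
  cases h : w.toList with
  | nil => simp [PySem.Chars.startswith, pvHead, h, List.isPrefixOf]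
  | cons a t =>
    simp only [PySem.Chars.startswith, pvHead, h, List.isPrefixOf, Bool.and_true]
    by_cases hca : c = a
    · subst hca; simp
    · have h1 : (c == a) = false := by
        simp only [beq_eq_false_iff_ne]; exact hca
      have h2 : (a == c) = false := by
        simp only [beq_eq_false_iff_ne]; exact fun h' => hca h'.symm
      simp [List.isPrefixOf, h1, h2]

theorem pvBucket_getD (lst : List String) (d : PySem.Dict Char (List String)) (c : Char) :
    (lst.foldl (fun d word =>
      match word.toList with
      | [] => d
      | a :: _ => d.modify a [] (fun ws => ws ++ [word])) d).getD c []
    = d.getD c [] ++ lst.filter (pvHead c) := by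
  induction lst generalizing d with
  | nil => simp
  | cons w t ih =>
    simp only [List.foldl_cons, List.filter_cons]
    cases h : w.toList with
    | nil => simp [h, ih, pvHead]
    | cons a rest =>
      simp only [h, ih, PySem.Dict.getD_modify, pvHead]
      by_cases hc : c = a
      · subst hc; simp
      · have : (a == c) = false := by
          simp only [beq_eq_false_iff_ne]
          exact fun h' => hc h'.symm
        simp [hc, this]

theorem sort_by_string_eq_flatMap (lst : List String) (txt : String) :
    sort_by_string lst txt = txt.toList.flatMap (fun c => lst.filter (pvHead c)) := by
  unfold sort_by_string
  have hstep : (fun (out : List String) (letter : Char) =>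
      lst.foldl (fun out word =>
        if PySem.Str.startswith word (String.ofList [letter]) then out ++ [word] else out) out)
      = fun out letter => out ++ lst.filter (pvHead letter) := by
    funext out letter
    have hf : (fun (out : List String) (word : String) =>
        if PySem.Str.startswith word (String.ofList [letter]) then out ++ [word] else out)
        = fun out word => if pvHead letter word then out ++ [word] else out := by
      funext o w; rw [pvStartswith_single]
    rw [hf]
    simpa [List.map_id] using PySem.List.foldl_append_if (pvHead letter) id lst out
  rw [hstep, PySem.List.foldl_append_eq_flatMap]
  simp

theorem sort_by_string_alt_eq_flatMap (lst : List String) (txt : String) :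
    sort_by_string_alt lst txt = txt.toList.flatMap (fun c => lst.filter (pvHead c)) := by
  unfold sort_by_string_alt
  simp only []
  have hstep : (fun (out : List String) (ch : Char) =>
      out ++ (lst.foldl (fun d word =>
        match word.toList with
        | [] => d
        | c :: _ => d.modify c [] (fun ws => ws ++ [word])) PySem.Dict.empty).getD ch [])
      = fun out ch => out ++ lst.filter (pvHead ch) := by
    funext out ch
    rw [pvBucket_getD]
    simp [PySem.Dict.getD_empty]
  rw [hstep, PySem.List.foldl_append_eq_flatMap]
  simp

-- ===== VERDICT (by name: the statement is the Claim_ definition above) =====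
theorem sort_by_string_spec : Claim_equal_sort_by_string := by
  intro lst txt _
  unfold Spec_sort_by_string
  rw [sort_by_string_eq_flatMap, sort_by_string_alt_eq_flatMap]
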